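-- pv_equiv track=rewrite | github.com/Bonorinoa/leanecon_v3 | src/prover/lsp_cache.py | find_decl
-- ===== SOURCE A (Python) =====
-- from typing import Any, Callable, Protocol
--
-- def find_decl(
--     outline: list[dict[str, Any]], name: str
-- ) -> dict[str, Any] | None:
--     for decl in outline:
--         if str(decl.get("name") or "") == name:
--             return decl
--     # Qualified→unqualified suffix match only. Earlier bidirectional
--     # matching could pick the wrong overload (e.g. ``foo`` matching
--     # unrelated ``Bar.foo``).
--     suffix = "." + name
--     for decl in outline:
--         decl_name = str(decl.get("name") or "")
--         if decl_name and decl_name.endswith(suffix):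
--             return decl
--     return None
-- ===== SOURCE B (Python) =====
-- def find_decl(outline, name):
--     suffix = "." + name
--     exact = None
--     suff = None
--     for decl in reversed(outline):
--         decl_name = str(decl.get("name") or "")
--         if decl_name == name:
--             exact = decl
--         elif decl_name.endswith(suffix):
--             suff = decl
--     return exact if exact is not None else suff
-- ===== Notes on version B (the rewrite author's own statement) =====
-- stated objective: alternative
-- what changed: Replaces A's two forward scans (exact pass, then suffix pass) by one backward scan that maintains two candidate slots (earliest exact match, earliest suffix match) by overwriting as earlier elements are seen, returning the exact candidate if set else the suffix candidate; the non-empty guard disappears since a name ending in '.'+name is never empty.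
import Mathlib
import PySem

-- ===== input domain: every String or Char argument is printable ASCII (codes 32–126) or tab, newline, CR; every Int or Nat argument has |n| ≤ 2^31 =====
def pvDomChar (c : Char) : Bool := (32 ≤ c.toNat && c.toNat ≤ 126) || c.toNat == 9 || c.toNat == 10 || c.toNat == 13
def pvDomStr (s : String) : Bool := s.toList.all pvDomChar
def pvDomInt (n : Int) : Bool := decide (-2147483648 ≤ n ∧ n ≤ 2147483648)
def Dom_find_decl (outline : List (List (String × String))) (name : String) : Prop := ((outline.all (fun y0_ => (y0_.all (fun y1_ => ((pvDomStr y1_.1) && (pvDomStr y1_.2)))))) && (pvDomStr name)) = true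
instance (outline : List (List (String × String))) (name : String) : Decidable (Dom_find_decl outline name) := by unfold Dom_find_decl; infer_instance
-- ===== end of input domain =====

-- B replaces A's two forward scans by one backward scan keeping two candidate
-- slots (earliest exact match, earliest suffix match), returning exact else
-- suffix (objective: alternative, same cost).

-- ===== PORT A =====

-- str(decl.get("name") or "") : values are strings here, so `or ""` maps a missing
-- or empty value to "" and str() is the identity.
def pvCoerceA (decl : List (String × String)) : String :=
  match (PySem.Dict.mk decl).get? "name" with
  | none => ""
  | some s => if s == "" then "" else s

-- first for-loop of A: first exact match
def pvLoopA1 (name : String) : List (List (String × String)) → Option (List (String × String))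
  | [] => none
  | decl :: rest =>
    if pvCoerceA decl == name then some decl else pvLoopA1 name rest

-- second for-loop of A: first non-empty name ending in suffix
def pvLoopA2 (suffix : String) : List (List (String × String)) → Option (List (String × String))
  | [] => none
  | decl :: rest =>
    let decl_name := pvCoerceA decl
    if (decl_name != "") && PySem.Str.endswith decl_name suffix then some decl
    else pvLoopA2 suffix rest

def find_decl (outline : List (List (String × String))) (name : String) : Option (List (String × String)) :=
  match pvLoopA1 name outline with
  | some decl => some decl
  | none =>
    let suffix := "." ++ name
    pvLoopA2 suffix outline

-- ===== PORT B =====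

def pvCoerceB (decl : List (String × String)) : String :=
  match (PySem.Dict.mk decl).get? "name" with
  | none => ""
  | some s => if s == "" then "" else s

-- B's reversed loop over outline: structural recursion processes the tail
-- (later elements, seen first by the reversed loop) and then lets the head
-- overwrite the two candidate slots, exactly as the Python loop does.
def pvScanB (name suffix : String) :
    List (List (String × String)) →
      Option (List (String × String)) × Option (List (String × String))
  | [] => (none, none)
  | decl :: rest =>
    let acc := pvScanB name suffix rest
    let decl_name := pvCoerceB decl
    if decl_name == name then (some decl, acc.2)
    else if PySem.Str.endswith decl_name suffix then (acc.1, some decl)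
    else acc

def find_decl_alt (outline : List (List (String × String))) (name : String) : Option (List (String × String)) :=
  let acc := pvScanB name ("." ++ name) outline
  match acc.1 with
  | some d => some d
  | none => acc.2

-- ===== PRECONDITION & SPEC =====
def Spec_find_decl (outline : List (List (String × String))) (name : String) (out : Option (List (String × String))) : Prop := out = find_decl_alt outline name
instance (outline : List (List (String × String))) (name : String) (out : Option (List (String × String))) : Decidable (Spec_find_decl outline name out) := by unfold Spec_find_decl; infer_instance

-- ===== CLAIM (what is proved, stated in full; the proofs are below) =====
def Claim_equal_find_decl : Prop := ∀ (outline : List (List (String × String))) (name : String), Dom_find_decl outline name → Spec_find_decl outline name (find_decl outline name)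

-- ===== LEMMAS AND PROOFS =====

-- a string ending in "." ++ name is never empty, so A's non-empty guard is redundant
theorem endswith_dot_ne_empty (dn name : String)
    (h : PySem.Str.endswith dn ("." ++ name) = true) : dn ≠ "" := by
  intro hdn
  subst hdn
  simp only [PySem.Str.endswith_eq] at h
  rw [PySem.Chars.endswith_iff] at h
  have := h.length_le
  simp at this

-- a string equal to name never ends in "." ++ name (it would be one char longer than itself)
theorem eq_not_endswith (name : String) :
    PySem.Str.endswith name ("." ++ name) = false := by
  by_contra h
  have h' : PySem.Str.endswith name ("." ++ name) = true := by
    cases hb : PySem.Str.endswith name ("." ++ name) with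
    | false => exact absurd hb h
    | true => rfl
  simp only [PySem.Str.endswith_eq] at h'
  rw [PySem.Chars.endswith_iff] at h'
  have := h'.length_le
  simp at this

-- the backward scan's two slots are exactly A's two loop results
theorem scanB_eq (name : String) (l : List (List (String × String))) :
    pvScanB name ("." ++ name) l = (pvLoopA1 name l, pvLoopA2 ("." ++ name) l) := by
  induction l with
  | nil => simp [pvScanB, pvLoopA1, pvLoopA2]
  | cons d rest ih =>
    have hcoerce : pvCoerceB d = pvCoerceA d := rfl
    simp only [pvScanB, pvLoopA1, pvLoopA2, hcoerce, ih]
    by_cases hex : pvCoerceA d == name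
    · have hne : pvCoerceA d = name := by simpa using hex
      have : PySem.Str.endswith (pvCoerceA d) ("." ++ name) = false := by
        rw [hne]; exact eq_not_endswith name
      have hsuf' : PySem.Chars.endswith (pvCoerceA d).toList ('.' :: name.toList) = false := by
        simpa using this
      simp [hex, hsuf']
    · by_cases hsuf : PySem.Str.endswith (pvCoerceA d) ("." ++ name) = true
      · have hne : pvCoerceA d ≠ "" := endswith_dot_ne_empty _ _ hsuf
        have hsuf' : PySem.Chars.endswith (pvCoerceA d).toList ('.' :: name.toList) = true := by
          simpa using hsuf
        simp [hex, hne, hsuf']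
      · have hsuf' : PySem.Chars.endswith (pvCoerceA d).toList ('.' :: name.toList) = false := by
          simpa using hsuf
        simp [hex, hsuf']

-- ===== VERDICT (by name: the statement is the Claim_ definition above) =====
theorem find_decl_spec : Claim_equal_find_decl := by
  intro outline name _
  unfold Spec_find_decl find_decl find_decl_alt
  rw [scanB_eq]
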